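-- pv_equiv track=rewrite | github.com/sangtq13/Data_Algorithm_Programming | sort_list_3_unique_numbers.py | sortListThreeUniqueNumbersA
-- ===== SOURCE A (Python) =====
-- from collections import OrderedDict
--
-- def sortListThreeUniqueNumbersA(arr):
--     d = OrderedDict()
--     ret = []
--     for m in arr:
--         d[m] = d.get(m,0) + 1
--     for key, count in d.items():
--         ret += ([key] * count)
--     return ret
-- ===== SOURCE B (Python) =====
-- def sortListThreeUniqueNumbersA(arr):
--     out = []
--     for key in dict.fromkeys(arr):
--         out += [x for x in arr if x == key]
--     return out
-- ===== Notes on version B (the rewrite author's own statement) =====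
-- stated objective: alternative
-- what changed: Instead of building a counter dict and replicating each key by its count, B deduplicates the list (dict.fromkeys) and, for each distinct value in first-appearance order, appends the filtered copies of that value straight from the input.
import Mathlib
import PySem

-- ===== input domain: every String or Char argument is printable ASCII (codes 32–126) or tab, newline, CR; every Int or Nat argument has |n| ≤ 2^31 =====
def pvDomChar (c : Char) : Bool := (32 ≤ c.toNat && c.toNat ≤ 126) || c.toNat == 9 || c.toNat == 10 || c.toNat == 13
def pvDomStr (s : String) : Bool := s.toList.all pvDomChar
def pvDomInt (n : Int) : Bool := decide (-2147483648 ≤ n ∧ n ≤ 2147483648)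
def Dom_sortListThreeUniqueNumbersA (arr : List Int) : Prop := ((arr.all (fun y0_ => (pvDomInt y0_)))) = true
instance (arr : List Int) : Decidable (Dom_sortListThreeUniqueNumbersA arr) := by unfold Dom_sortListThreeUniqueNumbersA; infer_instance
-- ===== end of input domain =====

-- B replaces A's counter-dict-then-replicate loop by deduplicating the input and, per distinct
-- value in first-appearance order, appending that value's occurrences filtered straight from the
-- input (objective: alternative decomposition, same result).

-- ===== PORT A =====
def sortListThreeUniqueNumbersA (arr : List Int) : List Int :=
  -- d = OrderedDict(); for m in arr: d[m] = d.get(m, 0) + 1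
  let d : PySem.Dict Int Int :=
    arr.foldl (fun d m => d.insert m (d.getD m 0 + 1)) PySem.Dict.empty
  -- ret = []; for key, count in d.items(): ret += [key] * count
  d.items.foldl (fun ret p => ret ++ List.replicate p.2.toNat p.1) []

-- ===== PORT B =====
def sortListThreeUniqueNumbersA_alt (arr : List Int) : List Int :=
  -- out = []; for key in dict.fromkeys(arr): out += [x for x in arr if x == key]
  (PySem.List.dedup arr).foldl (fun out key => out ++ arr.filter (fun x => x == key)) []

-- ===== PRECONDITION & SPEC =====
def Spec_sortListThreeUniqueNumbersA (arr : List Int) (out : List Int) : Prop := out = sortListThreeUniqueNumbersA_alt arr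
instance (arr : List Int) (out : List Int) : Decidable (Spec_sortListThreeUniqueNumbersA arr out) := by unfold Spec_sortListThreeUniqueNumbersA; infer_instance

-- ===== CLAIM (what is proved, stated in full; the proofs are below) =====
def Claim_equal_sortListThreeUniqueNumbersA : Prop := ∀ (arr : List Int), Dom_sortListThreeUniqueNumbersA arr → Spec_sortListThreeUniqueNumbersA arr (sortListThreeUniqueNumbersA arr)

-- ===== LEMMAS AND PROOFS =====

-- ===== VERDICT (by name: the statement is the Claim_ definition above) =====
theorem sortListThreeUniqueNumbersA_spec : Claim_equal_sortListThreeUniqueNumbersA := by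
  intro arr _
  unfold Spec_sortListThreeUniqueNumbersA sortListThreeUniqueNumbersA sortListThreeUniqueNumbersA_alt
  simp only [PySem.Dict.foldl_insert_getD_add_one_eq_counter, PySem.Dict.items_counter,
      PySem.List.foldl_append_eq_flatMap, List.flatMap_map, PySem.List.dedup_eq_ofList]
  simp [List.filter_beq]
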